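-- pv_equiv track=rewrite | github.com/ROB-2D2/Swivel-GH | bow_GUI1.py | LCS_consonant_calculator
-- ===== SOURCE A (Python) =====
-- def LCS_consonant_calculator (string1, string2):
--
--     string1 = ''.join ([letter for letter in string1 if letter not in "aeiou"])     #strips the string of vowels
--     string2 = ''.join ([letter for letter in string2 if letter not in "aeiou"])
--
--     start_point = 0             #this is so that we can iterate from the corect point in the j loop (dont want to recount letter matching)
--     LCS_length = 0
--
--     for i in range (len (string1)):
--
--         LCS_length_has_changed = False
--
--         for j in range(start_point, len (string2)):
--
--             if string1[i] == string2[j] and not LCS_length_has_changed: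
--
--                 LCS_length += 1         #actually need to break the loop here
--                 LCS_length_has_changed = True
--                 start_point = j + 1
--
--     return LCS_length
-- ===== SOURCE B (Python) =====
-- def LCS_consonant_calculator(string1, string2):
--     VOWELS = "aeiou"
--     pos = {}                      # consonant -> sorted list of its positions in vowel-stripped string2
--     j = 0
--     for ch in string2:
--         if ch not in VOWELS:
--             pos.setdefault(ch, []).append(j)
--             j += 1
--     count = 0
--     p = 0                         # next position in stripped string2 a match may use
--     for ch in string1:
--         if ch in VOWELS:
--             continue
--         occ = pos.get(ch, [])
--         lo, hi = 0, len(occ)      # binary search: first occurrence index >= p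
--         while lo < hi:
--             mid = (lo + hi) // 2
--             if occ[mid] < p:
--                 lo = mid + 1
--             else:
--                 hi = mid
--         if lo < len(occ):
--             count += 1
--             p = occ[lo] + 1
--     return count
-- ===== Notes on version B (the rewrite author's own statement) =====
-- stated objective: alternative
-- what changed: Replaces A's nested rescan loops (the inner loop never breaks and scans string2 to its end on every outer step) with a per-consonant position table built in one pass over string2 plus a hand-written binary search for the first occurrence at or after the greedy pointer.
import Mathlib
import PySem

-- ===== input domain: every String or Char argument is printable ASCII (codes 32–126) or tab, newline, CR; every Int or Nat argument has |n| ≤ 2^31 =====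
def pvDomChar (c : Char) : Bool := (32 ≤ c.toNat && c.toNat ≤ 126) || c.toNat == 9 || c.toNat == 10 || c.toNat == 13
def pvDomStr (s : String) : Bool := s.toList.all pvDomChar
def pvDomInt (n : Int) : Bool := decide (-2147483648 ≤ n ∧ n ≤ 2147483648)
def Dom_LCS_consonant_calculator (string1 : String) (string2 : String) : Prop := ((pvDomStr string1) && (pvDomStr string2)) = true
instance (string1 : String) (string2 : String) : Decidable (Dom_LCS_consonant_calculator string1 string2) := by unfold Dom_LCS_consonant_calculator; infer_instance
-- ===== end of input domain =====

-- B replaces A's nested full-rescan loops with a per-consonant position table plus a binary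
-- search for the first occurrence at or after the greedy pointer (objective: alternative).

-- the lowercase-vowel string "aeiou" both Pythons test membership in
def pvVowels : List Char := ['a', 'e', 'i', 'o', 'u']

-- ===== PORT A =====
-- Loop indices i, j and start_point are nonnegative and in range throughout, so Nat
-- ranges and `getD` are exact ports of Python's range / indexing here.
def LCS_consonant_calculator (string1 : String) (string2 : String) : Int :=
  let s1 := string1.toList.filter (fun c => decide (c ∉ pvVowels))
  let s2 := string2.toList.filter (fun c => decide (c ∉ pvVowels))
  let r := (List.range s1.length).foldl
    (fun (st : Nat × Int) i =>
      let inner := (List.range' st.1 (s2.length - st.1)).foldl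
        (fun (t : Bool × Nat × Int) j =>
          if (s1.getD i ' ' == s2.getD j ' ') && !t.1 then (true, j + 1, t.2.2 + 1) else t)
        (false, st.1, st.2)
      (inner.2.1, inner.2.2))
    (0, 0)
  r.2

-- ===== PORT B =====
-- Source B's hand-written `while lo < hi` binary search; positions are nonnegative, so Nat is exact.
def pvBsearch (occ : List Nat) (p : Nat) (lo hi : Nat) : Nat :=
  if _h : lo < hi then
    -- mid = (lo + hi) // 2, inlined
    if occ.getD ((lo + hi) / 2) 0 < p then pvBsearch occ p ((lo + hi) / 2 + 1) hi
    else pvBsearch occ p lo ((lo + hi) / 2)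
  else lo
termination_by hi - lo
decreasing_by all_goals omega

def LCS_consonant_calculator_alt (string1 : String) (string2 : String) : Int :=
  let built := string2.toList.foldl
    (fun (st : PySem.Dict Char (List Nat) × Nat) ch =>
      if ch ∈ pvVowels then st
      else (st.1.modify ch [] (fun l => l ++ [st.2]), st.2 + 1))
    (PySem.Dict.empty, 0)
  let r := string1.toList.foldl
    (fun (st : Int × Nat) ch =>
      if ch ∈ pvVowels then st
      else
        let occ := built.1.getD ch []
        let lo := pvBsearch occ st.2 0 occ.length
        if lo < occ.length then (st.1 + 1, occ.getD lo 0 + 1) else st)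
    (0, 0)
  r.1

-- ===== PRECONDITION & SPEC =====
def Spec_LCS_consonant_calculator (string1 : String) (string2 : String) (out : Int) : Prop := out = LCS_consonant_calculator_alt string1 string2
instance (string1 : String) (string2 : String) (out : Int) : Decidable (Spec_LCS_consonant_calculator string1 string2 out) := by unfold Spec_LCS_consonant_calculator; infer_instance

-- ===== CLAIM (what is proved, stated in full; the proofs are below) =====
def Claim_equal_LCS_consonant_calculator : Prop := ∀ (string1 : String) (string2 : String), Dom_LCS_consonant_calculator string1 string2 → Spec_LCS_consonant_calculator string1 string2 (LCS_consonant_calculator string1 string2)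

-- ===== LEMMAS AND PROOFS =====

-- the character of the vowel-stripped string2 at position j equals c (A's match test, seen from s1's char c)
def pvP (s2 : List Char) (c : Char) (j : Nat) : Bool := c == s2.getD j ' '

-- positions of c in the vowel-stripped string2
def occOf (s2 : List Char) (c : Char) : List Nat := (List.range s2.length).filter (pvP s2 c)

-- the first match position ≥ p (what A's inner loop finds)
def firstHit (s2 : List Char) (c : Char) (p : Nat) : Option Nat :=
  (List.range' p (s2.length - p)).find? (pvP s2 c)

def stepA (s2 : List Char) (st : Nat × Int) (c : Char) : Nat × Int :=
  match firstHit s2 c st.1 with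
  | some j => (j + 1, st.2 + 1)
  | none => st

def stepB (s2 : List Char) (st : Int × Nat) (c : Char) : Int × Nat :=
  let occ := occOf s2 c
  let lo := pvBsearch occ st.2 0 occ.length
  if lo < occ.length then (st.1 + 1, occ.getD lo 0 + 1) else st

-- once the flag is set, A's inner loop keeps the state
theorem pvFlagTrue (q : Nat → Bool) (l : List Nat) (x : Nat × Int) :
    l.foldl (fun (t : Bool × Nat × Int) j => if q j && !t.1 then (true, j + 1, t.2.2 + 1) else t)
      (true, x) = (true, x) := by
  induction l with
  | nil => rfl
  | cons a l ih => simpa using ih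

-- A's flag-machine inner loop = find? over the window
theorem pvInnerFold (q : Nat → Bool) : ∀ (n s : Nat) (x : Nat × Int),
    (List.range' s n).foldl
      (fun (t : Bool × Nat × Int) j => if q j && !t.1 then (true, j + 1, t.2.2 + 1) else t)
      (false, x)
    = match (List.range' s n).find? q with
      | some j => (true, j + 1, x.2 + 1)
      | none => (false, x) := by
  intro n
  induction n with
  | zero => intro s x; rfl
  | succ n ih =>
      intro s x
      rw [List.range'_succ]
      by_cases h : q s = true
      · have hc : (q s && !(false, x).1) = true := by simp [h]
        rw [List.foldl_cons, if_pos hc]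
        simp only [List.find?_cons, h]
        exact pvFlagTrue q _ _
      · have hc : ¬((q s && !(false, x).1) = true) := by simp [eq_false_of_ne_true h]
        rw [List.foldl_cons, if_neg hc]
        simp only [List.find?_cons, eq_false_of_ne_true h]
        exact ih (s + 1) x

theorem pvFindEqSome (q : Nat → Bool) : ∀ (n s m : Nat), s ≤ m → m < s + n → q m = true →
    (∀ j, s ≤ j → j < m → q j = false) → (List.range' s n).find? q = some m := by
  intro n
  induction n with
  | zero => intro s m h1 h2; omega
  | succ n ih =>
      intro s m h1 h2 h3 h4
      rw [List.range'_succ, List.find?_cons]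
      rcases Nat.eq_or_lt_of_le h1 with rfl | hlt
      · simp only [h3]
      · simp only [h4 s (Nat.le_refl _) hlt]
        exact ih (s + 1) m hlt (by omega) h3 (fun j hj1 hj2 => h4 j (by omega) hj2)

theorem occOf_pairwise (s2 : List Char) (c : Char) : (occOf s2 c).Pairwise (· < ·) :=
  List.Pairwise.filter _ List.pairwise_lt_range

theorem occOf_mem (s2 : List Char) (c : Char) (m : Nat) :
    m ∈ occOf s2 c ↔ m < s2.length ∧ pvP s2 c m = true := by
  simp [occOf, List.mem_filter, List.mem_range]

theorem occOf_mono (s2 : List Char) (c : Char) {i j : Nat} (hij : i < j)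
    (hj : j < (occOf s2 c).length) :
    (occOf s2 c).getD i 0 < (occOf s2 c).getD j 0 := by
  have h := (List.pairwise_iff_getElem).1 (occOf_pairwise s2 c) i j (Nat.lt_trans hij hj) hj hij
  rw [List.getD_eq_getElem _ _ (Nat.lt_trans hij hj), List.getD_eq_getElem _ _ hj]
  exact h

theorem pvBsearch_spec (occ : List Nat) (p : Nat)
    (hmono : ∀ i j, i < j → j < occ.length → occ.getD i 0 < occ.getD j 0) :
    ∀ lo hi, hi ≤ occ.length → lo ≤ hi → (∀ k, k < lo → occ.getD k 0 < p) →
      (∀ k, hi ≤ k → k < occ.length → p ≤ occ.getD k 0) →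
      (∀ k, k < pvBsearch occ p lo hi → occ.getD k 0 < p) ∧
      (∀ k, pvBsearch occ p lo hi ≤ k → k < occ.length → p ≤ occ.getD k 0) ∧
      pvBsearch occ p lo hi ≤ occ.length := by
  intro lo hi
  induction lo, hi using pvBsearch.induct occ p with
  | case1 lo hi hlt hmid ih =>
      intro hhi _hlh hlo hhiK
      rw [pvBsearch, dif_pos hlt, if_pos hmid]
      refine ih hhi (by omega) (fun k hk => ?_) hhiK
      rcases Nat.lt_or_ge k ((lo + hi) / 2) with hkm | hkm
      · exact Nat.lt_trans (hmono k ((lo + hi) / 2) hkm (by omega)) hmid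
      · have : k = (lo + hi) / 2 := by omega
        exact this ▸ hmid
  | case2 lo hi hlt hmid ih =>
      intro hhi _hlh hlo hhiK
      rw [pvBsearch, dif_pos hlt, if_neg hmid]
      refine ih (by omega) (by omega) hlo (fun k hk1 hk2 => ?_)
      rcases Nat.lt_or_ge ((lo + hi) / 2) k with hkm | hkm
      · exact Nat.le_of_lt (Nat.lt_of_le_of_lt (Nat.le_of_not_lt hmid) (hmono ((lo + hi) / 2) k hkm hk2))
      · have : k = (lo + hi) / 2 := by omega
        exact this ▸ Nat.le_of_not_lt hmid
  | case3 lo hi hge =>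
      intro hhi hlh hlo hhiK
      rw [pvBsearch, dif_neg hge]
      exact ⟨hlo, fun k hk1 hk2 => hhiK k (by omega) hk2, by omega⟩

-- the two greedy steps agree (modulo the component swap)
theorem pvStepEq (s2 : List Char) (c : Char) (p : Nat) (acc : Int) :
    stepA s2 (p, acc) c = ((stepB s2 (acc, p) c).2, (stepB s2 (acc, p) c).1) := by
  have hmono := fun i j hij hj => occOf_mono s2 c (i := i) (j := j) hij hj
  obtain ⟨hL, hR, hle⟩ := pvBsearch_spec (occOf s2 c) p hmono 0 (occOf s2 c).length
    (Nat.le_refl _) (Nat.zero_le _) (fun k hk => by omega) (fun k hk1 hk2 => by omega)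
  set occ := occOf s2 c with hocc
  set lo := pvBsearch occ p 0 occ.length with hlo
  by_cases hlt : lo < occ.length
  · -- a match exists: occ[lo] is the first position ≥ p with s2[·] = c
    have hm : occ.getD lo 0 = occ[lo] := List.getD_eq_getElem _ _ hlt
    have hmem : occ.getD lo 0 ∈ occ := hm ▸ List.getElem_mem hlt
    obtain ⟨hmlen, hmq⟩ := (occOf_mem s2 c _).1 hmem
    have hpm : p ≤ occ.getD lo 0 := hR lo (Nat.le_refl _) hlt
    have hfirst : firstHit s2 c p = some (occ.getD lo 0) := by
      apply pvFindEqSome _ _ _ _ hpm (by omega) hmq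
      intro j hj1 hj2
      by_cases hq : pvP s2 c j = true
      · exfalso
        have hjmem : j ∈ occ := (occOf_mem s2 c j).2 ⟨by omega, hq⟩
        obtain ⟨k, hk, hkj⟩ := List.mem_iff_getElem.1 hjmem
        rcases Nat.lt_or_ge k lo with hklo | hklo
        · have := hL k hklo
          rw [List.getD_eq_getElem _ _ hk, hkj] at this
          omega
        · rcases Nat.eq_or_lt_of_le hklo with rfl | hkgt
          · rw [hm] at hj2; omega
          · have := hmono lo k hkgt hk
            rw [List.getD_eq_getElem _ _ hk, hkj] at this
            omega
      · exact eq_false_of_ne_true hq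
    simp only [stepA, stepB, hfirst]
    rw [← hocc, ← hlo, if_pos hlt]
  · -- no occurrence of c at or after p
    have hfirst : firstHit s2 c p = none := by
      rw [firstHit, List.find?_eq_none]
      intro x hx hq
      rw [List.mem_range'_1] at hx
      have hxmem : x ∈ occ := (occOf_mem s2 c x).2 ⟨by omega, hq⟩
      obtain ⟨k, hk, hkj⟩ := List.mem_iff_getElem.1 hxmem
      have := hL k (by omega)
      rw [List.getD_eq_getElem _ _ hk, hkj] at this
      omega
    simp only [stepA, stepB, hfirst]
    rw [← hocc, ← hlo, if_neg hlt]

-- A's outer fold over indices = fold over the list itself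
theorem pvFoldRange {α β : Type} (F : β → α → β) (dflt : α) :
    ∀ (l : List α) (init : β),
      (List.range l.length).foldl (fun st i => F st (l.getD i dflt)) init = l.foldl F init := by
  intro l
  induction l using List.reverseRecOn with
  | nil => intro init; rfl
  | append_singleton l x ih =>
      intro init
      rw [List.length_append, List.length_singleton, List.range_succ, List.foldl_append,
        List.foldl_append]
      rw [PySem.List.foldl_congr_mem (List.range l.length) _
        (fun st i => F st (l.getD i dflt)) init
        (fun acc i hi => by
          rw [List.getD_append _ _ _ _ (List.mem_range.1 hi)])]
      rw [ih init]
      simp only [List.foldl_cons, List.foldl_nil]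
      congr 1
      simp [List.getD, List.getElem?_append_right]

-- B's vowel-skipping folds = folds over the filtered list
theorem pvFoldSkip {β : Type} (f : β → Char → β) :
    ∀ (l : List Char) (init : β),
      l.foldl (fun st ch => if ch ∈ pvVowels then st else f st ch) init
      = (l.filter (fun c => decide (c ∉ pvVowels))).foldl f init := by
  intro l
  induction l with
  | nil => intro init; rfl
  | cons a l ih =>
      intro init
      by_cases h : a ∈ pvVowels <;> simp [List.filter_cons, h, ih]

theorem occOf_cons (x : Char) (xs : List Char) (c : Char) :
    occOf (x :: xs) c = (if c == x then [0] else []) ++ (occOf xs c).map (· + 1) := by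
  have hcomp : (pvP (x :: xs) c) ∘ Nat.succ = pvP xs c := by
    funext j; simp [pvP, List.getD_cons_succ]
  have h0 : pvP (x :: xs) c 0 = (c == x) := by simp [pvP]
  rw [occOf, List.length_cons, List.range_succ_eq_map, List.filter_cons, List.filter_map,
    hcomp, h0]
  by_cases h : c == x <;> simp [h, occOf, Nat.succ_eq_add_one]

-- the dictionary built by B holds exactly the (shifted) occurrence lists
theorem pvBuild (c : Char) : ∀ (l : List Char) (d : PySem.Dict Char (List Nat)) (n : Nat),
    ((l.foldl (fun (st : PySem.Dict Char (List Nat) × Nat) ch =>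
        if ch ∈ pvVowels then st
        else (st.1.modify ch [] (fun v => v ++ [st.2]), st.2 + 1)) (d, n)).1).getD c []
    = d.getD c [] ++ (occOf (l.filter (fun c => decide (c ∉ pvVowels))) c).map (· + n) := by
  intro l
  induction l with
  | nil => simp [occOf]
  | cons ch l ih =>
      intro d n
      by_cases hv : ch ∈ pvVowels
      · rw [List.foldl_cons, if_pos hv, ih]
        rw [List.filter_cons, if_neg (by simp [hv])]
      · rw [List.foldl_cons, if_neg hv, ih]
        rw [List.filter_cons, if_pos (by simp [hv])]
        rw [occOf_cons, List.map_append, List.map_map]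
        have hmap : ((· + n) ∘ (· + 1)) = (fun j : Nat => j + (n + 1)) := by
          funext j; simp; omega
        rw [hmap]
        by_cases hc : c = ch
        · subst hc
          rw [PySem.Dict.getD_modify_self]
          simp [List.append_assoc]
        · rw [PySem.Dict.getD_modify_of_ne _ _ _ hc]
          have hb : (c == ch) = false := by simp [hc]
          simp [hb]

theorem pvFoldSwap (s2 : List Char) : ∀ (l : List Char) (p : Nat) (acc : Int),
    l.foldl (stepA s2) (p, acc)
    = ((l.foldl (stepB s2) (acc, p)).2, (l.foldl (stepB s2) (acc, p)).1) := by
  intro l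
  induction l with
  | nil => intro p acc; rfl
  | cons a l ih =>
      intro p acc
      simp only [List.foldl_cons, pvStepEq s2 a p acc]
      exact ih _ _

-- ===== VERDICT (by name: the statement is the Claim_ definition above) =====
-- B's port, rewritten to the filtered-list fold of stepB
theorem pvAltEq (string1 string2 : String) :
    LCS_consonant_calculator_alt string1 string2
    = ((string1.toList.filter (fun c => decide (c ∉ pvVowels))).foldl
        (stepB (string2.toList.filter (fun c => decide (c ∉ pvVowels)))) (0, 0)).1 := by
  have hempty : ∀ ch : Char, (PySem.Dict.empty : PySem.Dict Char (List Nat)).getD ch [] = [] := by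
    intro ch; simp [PySem.Dict.getD, PySem.Dict.get?, PySem.Dict.empty]
  have hb : ∀ ch : Char,
      ((string2.toList.foldl
        (fun (st : PySem.Dict Char (List Nat) × Nat) ch =>
          if ch ∈ pvVowels then st
          else (st.1.modify ch [] (fun l => l ++ [st.2]), st.2 + 1))
        (PySem.Dict.empty, 0)).1).getD ch []
      = occOf (string2.toList.filter (fun c => decide (c ∉ pvVowels))) ch := by
    intro ch
    rw [pvBuild ch string2.toList PySem.Dict.empty 0, hempty]
    simp
  simp only [LCS_consonant_calculator_alt]
  rw [PySem.List.foldl_congr_mem string1.toList _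
    (fun (st : Int × Nat) ch => if ch ∈ pvVowels then st else
      stepB (string2.toList.filter (fun c => decide (c ∉ pvVowels))) st ch) (0, 0)
    (fun st ch _ => by
      by_cases hv : ch ∈ pvVowels
      · simp [hv]
      · simp [hv, stepB, hb])]
  rw [pvFoldSkip]

-- A's port, rewritten to the filtered-list fold of stepA
theorem pvAEq (string1 string2 : String) :
    LCS_consonant_calculator string1 string2
    = ((string1.toList.filter (fun c => decide (c ∉ pvVowels))).foldl
        (stepA (string2.toList.filter (fun c => decide (c ∉ pvVowels)))) (0, 0)).2 := by
  simp only [LCS_consonant_calculator]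
  set s1 := string1.toList.filter (fun c => decide (c ∉ pvVowels)) with hs1
  set s2 := string2.toList.filter (fun c => decide (c ∉ pvVowels)) with hs2
  rw [pvFoldRange (fun (st : Nat × Int) c =>
      (((List.range' st.1 (s2.length - st.1)).foldl
        (fun (t : Bool × Nat × Int) j =>
          if (c == s2.getD j ' ') && !t.1 then (true, j + 1, t.2.2 + 1) else t)
        (false, st.1, st.2)).2.1,
       ((List.range' st.1 (s2.length - st.1)).foldl
        (fun (t : Bool × Nat × Int) j =>
          if (c == s2.getD j ' ') && !t.1 then (true, j + 1, t.2.2 + 1) else t)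
        (false, st.1, st.2)).2.2)) ' ' s1 (0, 0)]
  congr 1
  apply PySem.List.foldl_congr_mem
  intro st c _
  rw [pvInnerFold (fun j => c == s2.getD j ' ') (s2.length - st.1) st.1 (st.1, st.2)]
  have hpv : (fun j => c == s2.getD j ' ') = pvP s2 c := rfl
  rw [hpv]
  cases h : List.find? (pvP s2 c) (List.range' st.1 (s2.length - st.1)) with
  | none => simp [stepA, firstHit, h]
  | some j => simp [stepA, firstHit, h]

theorem LCS_consonant_calculator_spec : Claim_equal_LCS_consonant_calculator := by
  intro string1 string2 _hdom
  unfold Spec_LCS_consonant_calculator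
  rw [pvAEq, pvAltEq, pvFoldSwap]
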